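-- pv_equiv track=rewrite | github.com/pypi-data/pypi-mirror-398 | packages/md2lang-oai/md2lang_oai-1.0.0-py3-none-any.whl/md2lang_oai/chunker.py | _split_large_paragraph
-- ===== SOURCE A (Python) =====
-- from typing import List
--
-- def estimate_tokens(text: str) -> int:
--     """Rough token estimate: ~4 chars per token for English/Latin scripts."""
--     return len(text) // 4
--
-- def _split_large_paragraph(para: str, max_tokens: int) -> List[str]:
--     """Split a large paragraph by lines, then sentences, then force-split."""
--     lines = para.split("\n")
--     chunks: List[str] = []
--     current_chunk_parts: List[str] = []
--     current_tokens = 0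
--
--     for line in lines:
--         line_tokens = estimate_tokens(line)
--
--         if line_tokens > max_tokens:
--             # Flush current
--             if current_chunk_parts:
--                 chunks.append("\n".join(current_chunk_parts))
--                 current_chunk_parts = []
--                 current_tokens = 0
--
--             # Split line by sentences
--             sub_chunks = _split_large_line(line, max_tokens)
--             chunks.extend(sub_chunks)
--             continue
--
--         if current_tokens + line_tokens + 1 > max_tokens and current_chunk_parts:
--             chunks.append("\n".join(current_chunk_parts))
--             current_chunk_parts = []
--             current_tokens = 0
--
--         current_chunk_parts.append(line)
--         current_tokens += line_tokens + 1
--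
--     if current_chunk_parts:
--         chunks.append("\n".join(current_chunk_parts))
--
--     return chunks
--
-- def _split_large_line(line: str, max_tokens: int) -> List[str]:
--     """Split a large line by sentences (approximation: '. '), then force-split."""
--     sentences = line.split(". ")
--     chunks: List[str] = []
--     current_chunk_parts: List[str] = []
--     current_tokens = 0
--
--     for i, sent in enumerate(sentences):
--         # Restore period unless it's the last sentence
--         if i < len(sentences) - 1:
--             sent = sent + "."
--
--         sent_tokens = estimate_tokens(sent)
--
--         if sent_tokens > max_tokens:
--             # Flush current
--             if current_chunk_parts:
--                 chunks.append(" ".join(current_chunk_parts))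
--                 current_chunk_parts = []
--                 current_tokens = 0
--
--             # Force-split by characters
--             chunks.extend(_force_split(sent, max_tokens))
--             continue
--
--         if current_tokens + sent_tokens + 1 > max_tokens and current_chunk_parts:
--             chunks.append(" ".join(current_chunk_parts))
--             current_chunk_parts = []
--             current_tokens = 0
--
--         current_chunk_parts.append(sent)
--         current_tokens += sent_tokens + 1
--
--     if current_chunk_parts:
--         chunks.append(" ".join(current_chunk_parts))
--
--     return chunks
--
-- def _force_split(text: str, max_tokens: int) -> List[str]:
--     """Force-split text by characters to fit within max_tokens."""
--     max_chars = max_tokens * 4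
--     chunks: List[str] = []
--     for i in range(0, len(text), max_chars):
--         chunks.append(text[i : i + max_chars])
--     return chunks
-- ===== SOURCE B (Python) =====
-- def _split_large_paragraph(para, max_tokens):
--     return _pack(para.split("\n"), "\n", max_tokens,
--                  lambda line: _pack(_sentences(line), " ", max_tokens,
--                                     lambda sent: _char_chunks(sent, max_tokens)))
--
-- def _sentences(line):
--     ps = line.split(". ")
--     return [p + "." for p in ps[:-1]] + ps[-1:]
--
-- def _char_chunks(text, max_tokens):
--     w = max_tokens * 4
--     return [text[i:i + w] for i in range(0, len(text), w)]
--
-- def _pack(pieces, joiner, max_tokens, oversized):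
--     """Chunk-at-a-time: pull a maximal fitting prefix (or one oversized piece) off
--     the front of the list, emit it, repeat — no running chunk/parts/token state."""
--     out = []
--     while pieces:
--         head, pieces = pieces[0], pieces[1:]
--         if len(head) // 4 > max_tokens:
--             out += oversized(head)
--             continue
--         group, budget = [head], len(head) // 4 + 1
--         while pieces:
--             t = len(pieces[0]) // 4
--             if t > max_tokens or budget + t + 1 > max_tokens:
--                 break
--             group.append(pieces[0])
--             budget += t + 1
--             pieces = pieces[1:]
--         out.append(joiner.join(group))
--     return out
-- ===== Notes on version B (the rewrite author's own statement) =====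
-- stated objective: alternative
-- what changed: A keeps a running (chunks, parts, tokens) accumulator flushed in three near-duplicate loops; B is a chunk-at-a-time packer: one generic _pack repeatedly pulls either a single oversized piece (delegating to the next level) or a maximal fitting prefix off the front of the piece list and emits it joined, with sentence periods restored up front instead of per-index inside the loop.
import Mathlib
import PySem

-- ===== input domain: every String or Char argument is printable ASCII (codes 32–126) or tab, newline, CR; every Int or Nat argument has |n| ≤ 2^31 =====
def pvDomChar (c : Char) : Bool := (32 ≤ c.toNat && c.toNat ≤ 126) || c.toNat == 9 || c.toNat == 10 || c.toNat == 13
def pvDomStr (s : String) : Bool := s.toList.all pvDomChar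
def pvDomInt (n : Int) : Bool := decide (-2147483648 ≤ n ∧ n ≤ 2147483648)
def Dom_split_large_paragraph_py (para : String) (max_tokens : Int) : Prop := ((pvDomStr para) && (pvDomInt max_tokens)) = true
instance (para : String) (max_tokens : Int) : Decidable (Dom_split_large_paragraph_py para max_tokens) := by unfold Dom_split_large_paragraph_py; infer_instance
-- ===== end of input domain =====

-- B replaces A's running (chunks, parts, tokens) accumulator (three near-duplicate loops) by a generic
-- chunk-at-a-time packer that pulls a maximal fitting prefix (or one oversized piece) off the front of
-- the piece list per emitted chunk: an alternative decomposition, same values.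

def pvSplit (s sep : String) : List String := (PySem.Str.split? s sep).getD []  -- s.split(sep); exact: sep is never "" here, so split? is always some

-- ===== PORT A =====
def pvEstimateTokens (text : String) : Int := PySem.Int.floordiv (PySem.Str.len text) 4

def pvForceSplit (text : String) (max_tokens : Int) : List String :=
  let max_chars := max_tokens * 4
  (PySem.List.pyRange 0 (PySem.Str.len text) max_chars).foldl
    (fun chunks i => chunks ++ [PySem.Str.slice text (some i) (some (i + max_chars))]) []

def pvSplitLargeLine (line : String) (max_tokens : Int) : List String :=
  let sentences := pvSplit line ". "
  let st := (PySem.List.enumerate sentences 0).foldl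
    (fun (st : List String × List String × Int) p =>
      match st with
      | (chunks, parts, tok) =>
        let sent := if p.1 < (sentences.length : Int) - 1 then p.2 ++ "." else p.2
        let t := pvEstimateTokens sent
        if t > max_tokens then
          ((if parts.isEmpty then chunks else chunks ++ [PySem.Str.join " " parts]) ++ pvForceSplit sent max_tokens, [], 0)
        else if tok + t + 1 > max_tokens ∧ ¬ parts.isEmpty then
          (chunks ++ [PySem.Str.join " " parts], [sent], t + 1)
        else (chunks, parts ++ [sent], tok + t + 1)) ([], [], 0)
  match st with
  | (chunks, parts, _) => if parts.isEmpty then chunks else chunks ++ [PySem.Str.join " " parts]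

def split_large_paragraph_py (para : String) (max_tokens : Int) : List String :=
  let lines := pvSplit para "\n"
  let st := lines.foldl
    (fun (st : List String × List String × Int) line =>
      match st with
      | (chunks, parts, tok) =>
        let t := pvEstimateTokens line
        if t > max_tokens then
          ((if parts.isEmpty then chunks else chunks ++ [PySem.Str.join "\n" parts]) ++ pvSplitLargeLine line max_tokens, [], 0)
        else if tok + t + 1 > max_tokens ∧ ¬ parts.isEmpty then
          (chunks ++ [PySem.Str.join "\n" parts], [line], t + 1)
        else (chunks, parts ++ [line], tok + t + 1)) ([], [], 0)
  match st with
  | (chunks, parts, _) => if parts.isEmpty then chunks else chunks ++ [PySem.Str.join "\n" parts]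

-- ===== PORT B =====
def pvCharChunks (text : String) (max_tokens : Int) : List String :=
  let w := max_tokens * 4
  (PySem.List.pyRange 0 (PySem.Str.len text) w).map
    (fun i => PySem.Str.slice text (some i) (some (i + w)))

def pvSentences (line : String) : List String :=
  let ps := pvSplit line ". "
  (PySem.List.slice ps none (some (-1))).map (fun p => p ++ ".") ++
    PySem.List.slice ps (some (-1)) none

-- inner while of _pack: extend group while the next piece fits the budget
def pvTakeFit (max_tokens : Int) : List String → Int → List String → List String × List String
  | group, _, [] => (group, [])
  | group, budget, p :: ps =>
      let t := PySem.Int.floordiv (PySem.Str.len p) 4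
      if t > max_tokens ∨ budget + t + 1 > max_tokens then (group, p :: ps)
      else pvTakeFit max_tokens (group ++ [p]) (budget + t + 1) ps

lemma pvTakeFit_snd_le (max_tokens : Int) : ∀ (g : List String) (b : Int) (ps : List String),
    (pvTakeFit max_tokens g b ps).2.length ≤ ps.length := by
  intro g b ps
  induction ps generalizing g b with
  | nil => simp [pvTakeFit]
  | cons p ps ih =>
      simp only [pvTakeFit]
      split
      · simp
      · exact le_trans (ih _ _) (by simp)

-- outer while of _pack
def pvPack (ov : String → List String) (jn : String) (max_tokens : Int) : List String → List String
  | [] => []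
  | p :: ps =>
      let t := PySem.Int.floordiv (PySem.Str.len p) 4
      if t > max_tokens then ov p ++ pvPack ov jn max_tokens ps
      else
        let gr := pvTakeFit max_tokens [p] (t + 1) ps
        PySem.Str.join jn gr.1 :: pvPack ov jn max_tokens gr.2
  termination_by pieces => pieces.length
  decreasing_by
  · simp
  · exact Nat.lt_succ_of_le (pvTakeFit_snd_le max_tokens [p] (t + 1) ps)

def split_large_paragraph_py_alt (para : String) (max_tokens : Int) : List String :=
  pvPack
    (fun line =>
      pvPack (fun sent => pvCharChunks sent max_tokens) " " max_tokens (pvSentences line))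
    "\n" max_tokens (pvSplit para "\n")

-- ===== PRECONDITION & SPEC =====
-- Pre_ excludes exactly the inputs on which Python A raises ValueError: max_tokens = 0 together with a
-- line of ≥ 4 chars containing a (period-restored) sentence piece of ≥ 4 chars, which reaches
-- range(0, len, 0) in _force_split.  It excludes no input on which A returns.
def Pre_split_large_paragraph_py (para : String) (max_tokens : Int) : Prop :=
  max_tokens ≠ 0 ∨
    ∀ line ∈ pvSplit para "\n",
      PySem.Str.len line < 4 ∨
        ((∀ p ∈ (pvSplit line ". ").dropLast, PySem.Str.len p < 3) ∧
         ∀ p ∈ (pvSplit line ". ").drop ((pvSplit line ". ").length - 1),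
           PySem.Str.len p < 4)
instance (para : String) (max_tokens : Int) : Decidable (Pre_split_large_paragraph_py para max_tokens) := by
  unfold Pre_split_large_paragraph_py; infer_instance

def pvWitness_split_large_paragraph_py : String × Int := ("alpha beta. gamma\ndelta", 3)

def Spec_split_large_paragraph_py (para : String) (max_tokens : Int) (out : List String) : Prop := out = split_large_paragraph_py_alt para max_tokens
instance (para : String) (max_tokens : Int) (out : List String) : Decidable (Spec_split_large_paragraph_py para max_tokens out) := by unfold Spec_split_large_paragraph_py; infer_instance

-- ===== CLAIM (what is proved, stated in full; the proofs are below) =====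
def Claim_equal_split_large_paragraph_py : Prop := ∀ (para : String) (max_tokens : Int), Dom_split_large_paragraph_py para max_tokens → Pre_split_large_paragraph_py para max_tokens → Spec_split_large_paragraph_py para max_tokens (split_large_paragraph_py para max_tokens)

-- ===== LEMMAS AND PROOFS =====

-- A's loops share one shape: this generic step/finish pair (proof-only helpers)
def pvAstep (ov : String → List String) (jn : String) (max_tokens : Int)
    (st : List String × List String × Int) (piece : String) : List String × List String × Int :=
  match st with
  | (chunks, parts, tok) =>
    let t := PySem.Int.floordiv (PySem.Str.len piece) 4
    if t > max_tokens then
      ((if parts.isEmpty then chunks else chunks ++ [PySem.Str.join jn parts]) ++ ov piece, [], 0)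
    else if tok + t + 1 > max_tokens ∧ ¬ parts.isEmpty then
      (chunks ++ [PySem.Str.join jn parts], [piece], t + 1)
    else (chunks, parts ++ [piece], tok + t + 1)

def pvAfinish (jn : String) (st : List String × List String × Int) : List String :=
  match st with
  | (chunks, parts, _) => if parts.isEmpty then chunks else chunks ++ [PySem.Str.join jn parts]

-- the running-accumulator fold of A equals B's chunk-at-a-time packer
lemma pv_fold_eq_pack (ov : String → List String) (jn : String) (mt : Int) :
    ∀ (pieces : List String),
      (∀ chunks, pvAfinish jn (pieces.foldl (pvAstep ov jn mt) (chunks, [], 0))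
          = chunks ++ pvPack ov jn mt pieces)
      ∧ (∀ chunks acc budget, acc ≠ [] →
          pvAfinish jn (pieces.foldl (pvAstep ov jn mt) (chunks, acc, budget))
            = chunks ++ PySem.Str.join jn (pvTakeFit mt acc budget pieces).1
                :: pvPack ov jn mt (pvTakeFit mt acc budget pieces).2) := by
  intro pieces
  induction pieces with
  | nil =>
      constructor
      · intro chunks; simp [pvAfinish, pvPack]
      · intro chunks acc budget hacc
        simp [pvAfinish, pvTakeFit, pvPack, List.isEmpty_iff, hacc]
  | cons p ps ih =>
      constructor
      · intro chunks
        by_cases h1 : PySem.Int.floordiv (PySem.Str.len p) 4 > mt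
        · rw [List.foldl_cons, show pvAstep ov jn mt (chunks, [], 0) p = (chunks ++ ov p, [], 0) by
            simp only [pvAstep]; rw [if_pos h1]; simp]
          rw [ih.1]
          simp only [pvPack]
          rw [if_pos h1, List.append_assoc]
        · rw [List.foldl_cons, show pvAstep ov jn mt (chunks, [], 0) p
              = (chunks, [p], PySem.Int.floordiv (PySem.Str.len p) 4 + 1) by
            simp only [pvAstep]; rw [if_neg h1, if_neg (by simp)]; simp]
          rw [ih.2 chunks [p] _ (by simp)]
          simp only [pvPack]
          rw [if_neg h1]
      · intro chunks acc budget hacc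
        by_cases h1 : PySem.Int.floordiv (PySem.Str.len p) 4 > mt
        · rw [List.foldl_cons, show pvAstep ov jn mt (chunks, acc, budget) p
              = ((chunks ++ [PySem.Str.join jn acc]) ++ ov p, [], 0) by
            simp only [pvAstep]; rw [if_pos h1]; simp [List.isEmpty_iff, hacc]]
          rw [ih.1]
          simp only [pvTakeFit]
          rw [if_pos (Or.inl h1)]
          simp only [pvPack]
          rw [if_pos h1]
          simp
        · by_cases h2 : budget + PySem.Int.floordiv (PySem.Str.len p) 4 + 1 > mt
          · rw [List.foldl_cons, show pvAstep ov jn mt (chunks, acc, budget) p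
                = (chunks ++ [PySem.Str.join jn acc], [p], PySem.Int.floordiv (PySem.Str.len p) 4 + 1) by
              simp only [pvAstep]; rw [if_neg h1, if_pos ⟨h2, by simpa using hacc⟩]]
            rw [ih.2 _ [p] _ (by simp)]
            simp only [pvTakeFit]
            rw [if_pos (Or.inr h2)]
            simp only [pvPack]
            rw [if_neg h1]
            simp
          · rw [List.foldl_cons, show pvAstep ov jn mt (chunks, acc, budget) p
                = (chunks, acc ++ [p], budget + PySem.Int.floordiv (PySem.Str.len p) 4 + 1) by
              simp only [pvAstep]; rw [if_neg h1, if_neg (fun hc => h2 hc.1)]]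
            rw [ih.2 _ _ _ (by simp)]
            simp only [pvTakeFit]
            rw [if_neg (not_or.mpr ⟨h1, h2⟩)]

-- restoring the period through enumerate = restoring it on the slices up front
lemma pv_enum_restore_map (xs : List String) :
    (PySem.List.enumerate xs 0).map
      (fun p => if p.1 < (xs.length : Int) - 1 then p.2 ++ "." else p.2)
    = xs.dropLast.map (fun p => p ++ ".") ++ xs.drop (xs.length - 1) := by
  rcases List.eq_nil_or_concat xs with rfl | ⟨ys, z, rfl⟩
  · simp [PySem.List.enumerate]
  · simp only [List.concat_eq_append, PySem.List.enumerate_append, List.map_append,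
      List.length_append, List.length_singleton]
    have hfront : (PySem.List.enumerate ys 0).map
        (fun p : Int × String => if p.1 < ((ys.length + 1 : ℕ) : Int) - 1 then p.2 ++ "." else p.2)
        = ys.map (fun p => p ++ ".") := by
      rw [show ys.map (fun p => p ++ ".")
            = ((PySem.List.enumerate ys 0).map (fun x => x.2)).map (fun p => p ++ ".") by
          rw [PySem.List.map_snd_enumerate], List.map_map]
      refine List.map_congr_left ?_
      intro p hp
      rcases (PySem.List.mem_enumerate_iff ys 0 p).1 hp with ⟨k, hk, rfl⟩
      simp
      exact fun h => absurd h (by omega)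
    have hback : (PySem.List.enumerate [z] (0 + (ys.length : Int))).map
        (fun p : Int × String => if p.1 < ((ys.length + 1 : ℕ) : Int) - 1 then p.2 ++ "." else p.2)
        = [z] := by
      simp [PySem.List.enumerate]
    rw [hfront, hback]
    simp

-- A's _force_split equals B's _char_chunks
lemma pv_force_eq_char (text : String) (mt : Int) :
    pvForceSplit text mt = pvCharChunks text mt := by
  simp only [pvForceSplit, pvCharChunks]
  rw [PySem.List.foldl_append_singleton_eq_map]
  simp

-- A's _split_large_line equals B's sentence-level pack
lemma pv_line_eq_pack (line : String) (mt : Int) :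
    pvSplitLargeLine line mt
      = pvPack (fun sent => pvCharChunks sent mt) " " mt (pvSentences line) := by
  have h := (pv_fold_eq_pack (fun sent => pvCharChunks sent mt) " " mt (pvSentences line)).1 []
  rw [List.nil_append] at h
  rw [← h]
  simp only [pvSplitLargeLine, pvEstimateTokens, pv_force_eq_char]
  rw [show pvSentences line = (PySem.List.enumerate (pvSplit line ". ") 0).map
        (fun p => if p.1 < ((pvSplit line ". ").length : Int) - 1 then p.2 ++ "." else p.2) by
      simp only [pvSentences, PySem.List.slice_to_neg_one, PySem.List.slice_from_neg_one]
      exact (pv_enum_restore_map _).symm,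
    List.foldl_map]
  rfl

-- ===== VERDICT (by name: the statement is the Claim_ definition above) =====
theorem split_large_paragraph_py_spec : Claim_equal_split_large_paragraph_py := by
  intro para max_tokens _ _
  unfold Spec_split_large_paragraph_py split_large_paragraph_py split_large_paragraph_py_alt
  have h := (pv_fold_eq_pack
    (fun line => pvPack (fun sent => pvCharChunks sent max_tokens) " " max_tokens (pvSentences line))
    "\n" max_tokens (pvSplit para "\n")).1 []
  rw [List.nil_append] at h
  rw [← h]
  simp only [pvEstimateTokens, pv_line_eq_pack]
  rfl
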